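-- pv_equiv track=rewrite | github.com/pypi-data/pypi-mirror-76 | packages/python-lifelib/python-lifelib-2.3.11.tar.gz/python-lifelib-2.3.11/lifelib/genera/rulefiles/automorph.py | adjugate_row
-- ===== SOURCE A (Python) =====
-- from itertools import combinations, permutations
--
-- def subdets(pts):
--     '''
--     Compute determinants of all (n choose d) size-d subsets of n
--     points in Z^d.
--     '''
--
--     n = len(pts)
--     d = len(pts[0])
--     s = {tuple([]): 1}
--
--     for e in range(1, d+1):
--         for t in combinations(range(n), e):
--             t = tuple(t)
--
--             sgn = 1
--             val = 0
--
--             for i in range(e):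
--                 subt = t[:i] + t[i+1:]
--                 val += s[subt] * pts[t[i]][-e] * sgn
--                 sgn = 0 - sgn
--
--             s[t] = val
--
--     return s
--
-- def adjugate_row(pts, j):
--
--     n = len(pts)
--     s = subdets([p[:j] + p[j+1:] for p in pts])
--     t = tuple(range(n))
--     for i in range(n):
--         subt = t[:i] + t[i+1:]
--         sgn = 1 - (((i + j) % 2) * 2)
--         yield s[subt] * sgn
-- ===== SOURCE B (Python) =====
-- def adjugate_row(pts, j):
--     # Top-down cofactor recursion on explicit minor matrices, memoised by the
--     # matrix itself; no subset enumeration, no negative column indexing.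
--     n = len(pts)
--     w = n - 1
--     rows = []
--     for p in pts:
--         r = p[:j] + p[j+1:]
--         rows.append(tuple(r[len(r) - w:]))
--     cache = {}
--     for i in range(n):
--         minor = tuple(rows[:i] + rows[i+1:])
--         sign = -1 if (i + j) % 2 else 1
--         yield sign * _det(minor, cache)
--
-- def _det(m, cache):
--     # determinant by Laplace expansion along the first column, memoised
--     if not m:
--         return 1
--     v = cache.get(m)
--     if v is None:
--         v = 0
--         sgn = 1
--         for i in range(len(m)):
--             rest = tuple(r[1:] for r in m[:i] + m[i+1:])
--             v += sgn * m[i][0] * _det(rest, cache)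
--             sgn = -sgn
--         cache[m] = v
--     return v
-- ===== Notes on version B (the rewrite author's own statement) =====
-- stated objective: alternative
-- what changed: A builds determinants of ALL row-index subsets bottom-up via itertools.combinations in a dict keyed by index tuples with negative column indexing; B computes each cofactor by a top-down Laplace recursion on explicit minor matrices (drop row i, drop first column), memoised by the minor itself, touching only reachable subproblems and using no subset enumeration.
import Mathlib
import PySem

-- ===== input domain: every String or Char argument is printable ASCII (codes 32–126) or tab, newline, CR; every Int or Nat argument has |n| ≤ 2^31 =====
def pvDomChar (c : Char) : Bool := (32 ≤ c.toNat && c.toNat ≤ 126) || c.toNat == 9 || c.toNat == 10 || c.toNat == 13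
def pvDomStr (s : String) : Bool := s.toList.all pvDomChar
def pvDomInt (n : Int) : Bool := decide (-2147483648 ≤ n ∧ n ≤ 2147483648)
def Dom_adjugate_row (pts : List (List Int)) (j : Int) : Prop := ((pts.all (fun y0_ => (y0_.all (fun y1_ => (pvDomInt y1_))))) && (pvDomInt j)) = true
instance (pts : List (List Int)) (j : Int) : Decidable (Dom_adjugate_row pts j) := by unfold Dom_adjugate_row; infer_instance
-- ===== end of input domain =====

-- B replaces A's bottom-up dict over all row-index subsets (itertools.combinations,
-- negative column indexing) by a top-down memoised cofactor recursion on explicit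
-- minor matrices (objective: alternative; no speed claim).

-- ===== PORT A =====
-- dict lookups s[subt] are ported as getD _ 0: under Pre_ the key is always present
-- (a missing key is Python's KeyError, excluded by Pre_).
def subdets (pts : List (List Int)) : PySem.Dict (List Int) Int :=
  let n : Int := pts.length
  let d : Int := ((PySem.List.pyGetD pts 0 []).length : Int)
  (PySem.List.pyRange 1 (d + 1) 1).foldl (fun s e =>
    (PySem.List.combinations (PySem.List.pyRange 0 n 1) e.toNat).foldl (fun s t =>
      let r := (PySem.List.pyRange 0 e 1).foldl (fun (sv : Int × Int) i =>
          let subt := PySem.List.slice t none (some i) ++ PySem.List.slice t (some (i + 1)) none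
          (0 - sv.1,
           sv.2 + s.getD subt 0 * PySem.List.pyGetD (PySem.List.pyGetD pts (PySem.List.pyGetD t i 0) []) (0 - e) 0 * sv.1))
        (1, 0)
      s.insert t r.2) s)
    (PySem.Dict.ofList [([], 1)])

def adjugate_row (pts : List (List Int)) (j : Int) : List Int :=
  let n : Int := pts.length
  let s := subdets (pts.map (fun p => PySem.List.slice p none (some j) ++ PySem.List.slice p (some (j + 1)) none))
  let t := PySem.List.pyRange 0 n 1
  (PySem.List.pyRange 0 n 1).foldl (fun out i =>
    let subt := PySem.List.slice t none (some i) ++ PySem.List.slice t (some (i + 1)) none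
    let sgn : Int := 1 - (PySem.Int.mod (i + j) 2) * 2
    out ++ [s.getD subt 0 * sgn]) []

-- ===== PORT B =====
-- _det(m, cache) from Source B; the Nat fuel only makes the recursion total
-- (every call site passes fuel ≥ m.length, so the 0-fuel branch is never taken).
def bdet : Nat → List (List Int) → PySem.Dict (List (List Int)) Int → Int × PySem.Dict (List (List Int)) Int
  | _, [], c => (1, c)
  | 0, _ :: _, c => (0, c)
  | k + 1, m0 :: mr, c =>
    let m := m0 :: mr
    match c.get? m with
    | some v => (v, c)
    | none =>
      let st := (PySem.List.pyRange 0 (m.length : Int) 1).foldl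
        (fun (st : Int × Int × PySem.Dict (List (List Int)) Int) i =>
          let rest := (PySem.List.slice m none (some i) ++ PySem.List.slice m (some (i + 1)) none).map
              (fun r => PySem.List.slice r (some 1) none)
          let p := bdet k rest st.2.2
          (st.1 + st.2.1 * PySem.List.pyGetD (PySem.List.pyGetD m i []) 0 0 * p.1, 0 - st.2.1, p.2))
        (0, 1, c)
      (st.1, st.2.2.insert m st.1)

def adjugate_row_alt (pts : List (List Int)) (j : Int) : List Int :=
  let n : Int := pts.length
  let w : Int := n - 1
  let rows := pts.map (fun p =>
    let r := PySem.List.slice p none (some j) ++ PySem.List.slice p (some (j + 1)) none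
    PySem.List.slice r (some ((r.length : Int) - w)) none)
  let st := (PySem.List.pyRange 0 n 1).foldl
    (fun (st : List Int × PySem.Dict (List (List Int)) Int) i =>
      let minor := PySem.List.slice rows none (some i) ++ PySem.List.slice rows (some (i + 1)) none
      let sign : Int := if PySem.Int.mod (i + j) 2 ≠ 0 then -1 else 1
      let p := bdet minor.length minor st.2
      (st.1 ++ [sign * p.1], p.2))
    ([], PySem.Dict.empty)
  st.1

-- ===== PRECONDITION & SPEC =====
-- Pre_ is exactly the set of inputs on which the Python A returns: pts = [] is an
-- IndexError (len(pts[0])); a row shorter than min(d, n) after removing column j is an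
-- IndexError at pts[t[i]][-e]; d < n-1 makes the final lookup s[subt] a KeyError.
def Pre_adjugate_row (pts : List (List Int)) (j : Int) : Prop :=
  pts ≠ [] ∧
  (∀ r ∈ pts.map (fun p => PySem.List.slice p none (some j) ++ PySem.List.slice p (some (j + 1)) none),
      min ((PySem.List.slice (pts.headD []) none (some j) ++ PySem.List.slice (pts.headD []) (some (j + 1)) none).length) pts.length ≤ r.length) ∧
  pts.length - 1 ≤ (PySem.List.slice (pts.headD []) none (some j) ++ PySem.List.slice (pts.headD []) (some (j + 1)) none).length
instance (pts : List (List Int)) (j : Int) : Decidable (Pre_adjugate_row pts j) := by unfold Pre_adjugate_row; infer_instance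

def pvWitness_adjugate_row : List (List Int) × Int := ([[1, 2], [3, 4]], 0)

def Spec_adjugate_row (pts : List (List Int)) (j : Int) (out : List Int) : Prop := out = adjugate_row_alt pts j
instance (pts : List (List Int)) (j : Int) (out : List Int) : Decidable (Spec_adjugate_row pts j out) := by unfold Spec_adjugate_row; infer_instance

-- ===== CLAIM (what is proved, stated in full; the proofs are below) =====
def Claim_equal_adjugate_row : Prop := ∀ (pts : List (List Int)) (j : Int), Dom_adjugate_row pts j → Pre_adjugate_row pts j → Spec_adjugate_row pts j (adjugate_row pts j)

-- ===== LEMMAS AND PROOFS =====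

-- Reference value: pvDets k m = determinant of m by first-column Laplace expansion
-- (fuel k; used with k = m.length throughout). Both ports are proved equal to it.
def pvAltSum (g : Int → Int) : List Int → Int
  | [] => 0
  | i :: l => g i - pvAltSum g l

def pvDets : Nat → List (List Int) → Int
  | _, [] => 1
  | 0, _ :: _ => 0
  | k + 1, m0 :: mr =>
      pvAltSum (fun i => PySem.List.pyGetD (PySem.List.pyGetD (m0 :: mr) i []) 0 0 *
          pvDets k (((m0 :: mr).eraseIdx i.toNat).map (fun r => r.drop 1)))
        (PySem.List.pyRange 0 (((m0 :: mr).length : Int)) 1)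

def pvTrim (e : Nat) (r : List Int) : List Int := r.drop (r.length - e)

def pvSel (q : List (List Int)) (e : Nat) (t : List Int) : List (List Int) :=
  t.map (fun i => pvTrim e (PySem.List.pyGetD q i []))

def CacheOKB (c : PySem.Dict (List (List Int)) Int) : Prop :=
  ∀ m v, c.get? m = some v → v = pvDets m.length m

def InvA (q : List (List Int)) (s : PySem.Dict (List Int) Int) (E : Nat) : Prop :=
  ∀ t : List Int, t.Sublist (PySem.List.pyRange 0 ((q.length : Int)) 1) → t.length ≤ E →
    s.getD t 0 = pvDets t.length (pvSel q t.length t)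

theorem pvAltSum_congr {f g : Int → Int} : ∀ {l : List Int}, (∀ i ∈ l, f i = g i) → pvAltSum f l = pvAltSum g l := by
  intro l
  induction l with
  | nil => intro _; rfl
  | cons i l ih =>
      intro h
      simp only [pvAltSum, h i (by simp), ih (fun x hx => h x (by simp [hx]))]

theorem pvCut {α : Type} (l : List α) (i : Int) (h0 : 0 ≤ i) :
    PySem.List.slice l none (some i) ++ PySem.List.slice l (some (i + 1)) none = l.eraseIdx i.toNat := by
  rw [PySem.List.slice_to _ h0, PySem.List.slice_from _ (by omega), List.eraseIdx_eq_take_drop_succ]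
  congr 2
  omega

theorem pvTrim_length (e : Nat) (r : List Int) (h : e ≤ r.length) : (pvTrim e r).length = e := by
  simp [pvTrim]; omega

theorem pvTrim_tail (e : Nat) (r : List Int) (h1 : 1 ≤ e) (h2 : e ≤ r.length) :
    (pvTrim e r).drop 1 = pvTrim (e - 1) r := by
  simp [pvTrim, List.drop_drop]
  omega

theorem pvGetD_neg (e : Nat) (r : List Int) (h1 : 1 ≤ e) (h2 : e ≤ r.length) :
    PySem.List.pyGetD r (0 - (e : Int)) 0 = (pvTrim e r).headD 0 := by
  simp only [PySem.List.pyGetD, PySem.List.pyGet?, PySem.List.pyIdx?]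
  rw [if_neg (by omega), if_pos (by omega)]
  have h3 : (-(0 - (e:Int))).toNat = e := by omega
  rw [h3]
  simp only [Option.bind]
  rw [List.getElem?_eq_getElem (by omega)]
  simp only [Option.getD_some, pvTrim]
  rw [List.headD_eq_head?, List.head?_drop]
  simp [List.getElem?_eq_getElem (show r.length - e < r.length by omega)]

-- A's inner loop (sgn/val accumulator pair) computes an alternating sum.
theorem pvAltFold (f : Int → Int) (step : Int × Int → Int → Int × Int)
    (hstep : ∀ sv i, step sv i = (0 - sv.1, sv.2 + f i * sv.1)) :
    ∀ (l : List Int) (s0 v : Int), l.foldl step (s0, v) = ((-1) ^ l.length * s0, v + s0 * pvAltSum f l) := by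
  intro l
  induction l with
  | nil => intro s0 v; simp [pvAltSum]
  | cons i l ih =>
      intro s0 v
      rw [List.foldl_cons, hstep, ih]
      simp [pvAltSum, pow_succ]
      ring

-- Laplace expansion of pvDets on a selected-and-trimmed submatrix, in the form A's loop produces.
theorem pvDets_sel_expand (q : List (List Int)) (e : Nat) (t : List Int)
    (h1 : 1 ≤ e) (ht : t.length = e)
    (hrows : ∀ i ∈ t, (e : Int) ≤ ((PySem.List.pyGetD q i []).length : Int)) :
    pvDets e (pvSel q e t) =
      pvAltSum (fun i =>
        PySem.List.pyGetD (PySem.List.pyGetD q (PySem.List.pyGetD t i 0) []) (0 - (e : Int)) 0 *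
          pvDets (e - 1) (pvSel q (e - 1) (t.eraseIdx i.toNat)))
        (PySem.List.pyRange 0 ((e : Int)) 1) := by
  obtain ⟨E, rfl⟩ : ∃ E, e = E + 1 := ⟨e - 1, by omega⟩
  have hMlen : (pvSel q (E + 1) t).length = E + 1 := by simp [pvSel, ht]
  cases hM : pvSel q (E + 1) t with
  | nil => rw [hM] at hMlen; simp at hMlen
  | cons m0 mr =>
    rw [pvDets, ← hM, hMlen]
    apply pvAltSum_congr
    intro i hi
    rw [PySem.List.mem_pyRange_one] at hi
    have hit : i.toNat < t.length := by omega
    have hidx : PySem.List.pyGetD t i 0 = t[i.toNat] := PySem.List.pyGetD_eq_getElem t 0 hi.1 (by omega)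
    have hmem : t[i.toNat] ∈ t := List.getElem_mem hit
    have hrow : (E + 1 : Int) ≤ ((PySem.List.pyGetD q t[i.toNat] []).length : Int) := hrows _ hmem
    have hrowN : E + 1 ≤ (PySem.List.pyGetD q t[i.toNat] []).length := by exact_mod_cast hrow
    have hMe : PySem.List.pyGetD (pvSel q (E + 1) t) i [] = pvTrim (E + 1) (PySem.List.pyGetD q t[i.toNat] []) := by
      rw [PySem.List.pyGetD_eq_getElem _ _ hi.1 (by rw [hMlen]; omega)]
      simp [pvSel]
    have hminor : List.map (fun r => List.drop 1 r) ((pvSel q (E + 1) t).eraseIdx i.toNat) =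
        pvSel q E (t.eraseIdx i.toNat) := by
      rw [pvSel, List.eraseIdx_map, List.map_map, pvSel]
      apply List.map_eq_map_iff.mpr
      intro x hx
      have hxmem : x ∈ t := List.mem_of_mem_eraseIdx hx
      have := hrows x hxmem
      simp only [Function.comp]
      rw [pvTrim_tail (E + 1) _ (by omega) (by exact_mod_cast this)]
      norm_num
    congr 1
    · -- leading entry
      rw [hMe, hidx, pvGetD_neg (E + 1) _ (by omega) hrowN]
      have hlen : (pvTrim (E + 1) (PySem.List.pyGetD q t[i.toNat] [])).length = E + 1 :=
        pvTrim_length _ _ hrowN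
      rw [PySem.List.pyGetD_of_nonneg _ _ le_rfl]
      cases hT : pvTrim (E + 1) (PySem.List.pyGetD q t[i.toNat] []) with
      | nil => rw [hT] at hlen; simp at hlen
      | cons a u => simp
    · -- minor
      rw [hminor]
      norm_num

theorem pvBdet_ok : ∀ (k : Nat) (m : List (List Int)) (c : PySem.Dict (List (List Int)) Int),
    m.length ≤ k → CacheOKB c →
    (bdet k m c).1 = pvDets m.length m ∧ CacheOKB (bdet k m c).2 := by
  intro k
  induction k with
  | zero =>
      intro m c hm hc
      have : m = [] := by cases m <;> simp_all
      subst this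
      simpa [bdet, pvDets] using hc
  | succ k ih =>
      intro m c hm hc
      match m with
      | [] => simpa [bdet, pvDets] using hc
      | m0 :: mr =>
        simp only [bdet]
        cases hget : c.get? (m0 :: mr) with
        | some v =>
            exact ⟨hc _ _ hget, hc⟩
        | none =>
            have hmr : mr.length ≤ k := by simpa using hm
            have hsl : ∀ r : List Int, PySem.List.slice r (some 1) = r.drop 1 := fun r => by
              rw [PySem.List.slice_from r (by omega)]; norm_num
            have hfold : ∀ (l : List Int), (∀ i ∈ l, 0 ≤ i ∧ i < ((m0 :: mr).length : Int)) →
                ∀ (v sg : Int) (c' : PySem.Dict (List (List Int)) Int), CacheOKB c' →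
                (List.foldl
                  (fun (st : Int × Int × PySem.Dict (List (List Int)) Int) i =>
                    (st.1 +
                        st.2.1 * PySem.List.pyGetD (PySem.List.pyGetD (m0 :: mr) i []) 0 0 *
                          (bdet k
                              (List.map (fun r => PySem.List.slice r (some 1))
                                (PySem.List.slice (m0 :: mr) none (some i) ++ PySem.List.slice (m0 :: mr) (some (i + 1))))
                              st.2.2).1,
                      0 - st.2.1,
                      (bdet k
                          (List.map (fun r => PySem.List.slice r (some 1))
                            (PySem.List.slice (m0 :: mr) none (some i) ++ PySem.List.slice (m0 :: mr) (some (i + 1))))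
                          st.2.2).2))
                  (v, sg, c') l).1 =
                    v + sg * pvAltSum (fun i => PySem.List.pyGetD (PySem.List.pyGetD (m0 :: mr) i []) 0 0 *
                      pvDets mr.length (((m0 :: mr).eraseIdx i.toNat).map (fun r => r.drop 1))) l ∧
                  CacheOKB (List.foldl
                  (fun (st : Int × Int × PySem.Dict (List (List Int)) Int) i =>
                    (st.1 +
                        st.2.1 * PySem.List.pyGetD (PySem.List.pyGetD (m0 :: mr) i []) 0 0 *
                          (bdet k
                              (List.map (fun r => PySem.List.slice r (some 1))
                                (PySem.List.slice (m0 :: mr) none (some i) ++ PySem.List.slice (m0 :: mr) (some (i + 1))))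
                              st.2.2).1,
                      0 - st.2.1,
                      (bdet k
                          (List.map (fun r => PySem.List.slice r (some 1))
                            (PySem.List.slice (m0 :: mr) none (some i) ++ PySem.List.slice (m0 :: mr) (some (i + 1))))
                          st.2.2).2))
                  (v, sg, c') l).2.2 := by
              intro l
              induction l with
              | nil => intro _ v sg c' hc'; simpa [pvAltSum] using hc'
              | cons i l ihl =>
                  intro hl v sg c' hc'
                  obtain ⟨hi0, hilt⟩ := hl i (by simp)
                  have hrest : List.map (fun r => PySem.List.slice r (some 1))
                      (PySem.List.slice (m0 :: mr) none (some i) ++ PySem.List.slice (m0 :: mr) (some (i + 1))) =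
                      ((m0 :: mr).eraseIdx i.toNat).map (fun r => r.drop 1) := by
                    rw [pvCut _ _ hi0]
                    simp only [hsl]
                  have hrlen : (((m0 :: mr).eraseIdx i.toNat).map (fun r => List.drop 1 r)).length = mr.length := by
                    rw [List.length_map, List.length_eraseIdx_of_lt (by omega)]
                    simp
                  obtain ⟨hv, hcok⟩ := ih (((m0 :: mr).eraseIdx i.toNat).map (fun r => r.drop 1)) c'
                    (by rw [hrlen]; exact hmr) hc'
                  rw [List.foldl_cons]
                  have e : (v +
                        sg * PySem.List.pyGetD (PySem.List.pyGetD (m0 :: mr) i []) 0 0 *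
                          (bdet k
                              (List.map (fun r => PySem.List.slice r (some 1))
                                (PySem.List.slice (m0 :: mr) none (some i) ++ PySem.List.slice (m0 :: mr) (some (i + 1))))
                              c').1,
                      0 - sg,
                      (bdet k
                          (List.map (fun r => PySem.List.slice r (some 1))
                            (PySem.List.slice (m0 :: mr) none (some i) ++ PySem.List.slice (m0 :: mr) (some (i + 1))))
                          c').2) =
                      (v + sg * (PySem.List.pyGetD (PySem.List.pyGetD (m0 :: mr) i []) 0 0 *
                          pvDets mr.length (((m0 :: mr).eraseIdx i.toNat).map (fun r => r.drop 1))),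
                        0 - sg,
                        (bdet k (((m0 :: mr).eraseIdx i.toNat).map (fun r => r.drop 1)) c').2) := by
                    rw [hrest, hv, hrlen]
                    rw [Prod.mk.injEq]
                    exact ⟨by ring, rfl⟩
                  dsimp only
                  rw [e]
                  obtain ⟨h1, h2⟩ := ihl (fun x hx => hl x (by simp [hx]))
                    (v + sg * (PySem.List.pyGetD (PySem.List.pyGetD (m0 :: mr) i []) 0 0 *
                      pvDets mr.length (((m0 :: mr).eraseIdx i.toNat).map (fun r => r.drop 1))))
                    (0 - sg)
                    ((bdet k (((m0 :: mr).eraseIdx i.toNat).map (fun r => r.drop 1)) c').2) hcok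
                  refine ⟨?_, h2⟩
                  rw [h1, pvAltSum]
                  ring
            obtain ⟨h1, h2⟩ := hfold (PySem.List.pyRange 0 ((m0 :: mr).length : Int) 1)
              (fun i hi => by rw [PySem.List.mem_pyRange_one] at hi; exact ⟨hi.1, hi.2⟩) 0 1 c hc
            have hexp : pvDets (m0 :: mr).length (m0 :: mr) =
                pvAltSum (fun i => PySem.List.pyGetD (PySem.List.pyGetD (m0 :: mr) i []) 0 0 *
                  pvDets mr.length (((m0 :: mr).eraseIdx i.toNat).map (fun r => r.drop 1)))
                  (PySem.List.pyRange 0 ((mr.length + 1 : Nat) : Int) 1) := by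
              rw [List.length_cons, pvDets]
              simp
            constructor
            · rw [h1, hexp, show ((m0 :: mr).length : Int) = ((mr.length + 1 : Nat) : Int) by simp]
              ring
            · intro mm vv hmm
              rw [PySem.Dict.get?_insert] at hmm
              by_cases hcase : mm = m0 :: mr
              · subst hcase
                rw [if_pos rfl] at hmm
                cases hmm
                rw [h1, hexp, show ((m0 :: mr).length : Int) = ((mr.length + 1 : Nat) : Int) by simp]
                ring
              · rw [if_neg hcase] at hmm
                exact h2 _ _ hmm

-- One insertion of subdets' combination loop: the inserted value is correct, and
-- everything already correct stays correct.
theorem pvComboStep (q : List (List Int)) (s : PySem.Dict (List Int) Int) (eZ : Int) (c : List Int)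
    (he : 1 ≤ eZ)
    (hsub : c.Sublist (PySem.List.pyRange 0 ((q.length : Int)) 1))
    (hlen : (c.length : Int) = eZ)
    (hrows : ∀ i ∈ c, (c.length : Int) ≤ ((PySem.List.pyGetD q i []).length : Int))
    (hinv : InvA q s (c.length - 1)) :
    (s.insert c ((PySem.List.pyRange 0 eZ 1).foldl (fun (sv : Int × Int) i =>
        let subt := PySem.List.slice c none (some i) ++ PySem.List.slice c (some (i + 1)) none
        (0 - sv.1,
         sv.2 + s.getD subt 0 * PySem.List.pyGetD (PySem.List.pyGetD q (PySem.List.pyGetD c i 0) []) (0 - eZ) 0 * sv.1))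
      (1, 0)).2).getD c 0 = pvDets c.length (pvSel q c.length c) := by
  subst hlen
  have hE1 : 1 ≤ c.length := by exact_mod_cast he
  have hstepv := pvAltFold
    (fun i => s.getD (PySem.List.slice c none (some i) ++ PySem.List.slice c (some (i + 1)) none) 0 *
      PySem.List.pyGetD (PySem.List.pyGetD q (PySem.List.pyGetD c i 0) []) (0 - (c.length : Int)) 0)
    (fun (sv : Int × Int) i =>
        let subt := PySem.List.slice c none (some i) ++ PySem.List.slice c (some (i + 1)) none
        (0 - sv.1,
         sv.2 + s.getD subt 0 * PySem.List.pyGetD (PySem.List.pyGetD q (PySem.List.pyGetD c i 0) []) (0 - (c.length : Int)) 0 * sv.1))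
    (fun sv i => rfl)
    (PySem.List.pyRange 0 ((c.length : Int)) 1) 1 0
  rw [hstepv]
  rw [PySem.Dict.getD_insert, if_pos rfl]
  rw [pvDets_sel_expand q c.length c hE1 rfl hrows]
  dsimp only
  rw [zero_add, one_mul]
  apply pvAltSum_congr
  intro i hi
  rw [PySem.List.mem_pyRange_one] at hi
  have hit : i.toNat < c.length := by omega
  rw [pvCut c i hi.1]
  have hsub' : (c.eraseIdx i.toNat).Sublist (PySem.List.pyRange 0 ((q.length : Int)) 1) :=
    (List.eraseIdx_sublist c i.toNat).trans hsub
  have hlen' : (c.eraseIdx i.toNat).length = c.length - 1 := by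
    rw [List.length_eraseIdx_of_lt hit]
  rw [hinv (c.eraseIdx i.toNat) hsub' (by omega)]
  rw [hlen']
  ring

theorem pvHeadGet (q : List (List Int)) (hq : q ≠ []) : PySem.List.pyGetD q 0 [] = q.headD [] := by
  cases q with
  | nil => simp_all
  | cons a l => simp [PySem.List.pyGetD, PySem.List.pyGet?, PySem.List.pyIdx?]

theorem pvMemRange (q : List (List Int)) (i : Int) (h0 : 0 ≤ i) (h1 : i < (q.length : Int)) :
    PySem.List.pyGetD q i [] ∈ q := by
  rw [PySem.List.pyGetD_eq_getElem q [] h0 h1]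
  exact List.getElem_mem (by omega)

theorem pvCombosFold (q : List (List Int)) (eZ : Int) (he : 1 ≤ eZ)
    (hrow : ∀ (c : List Int), c.Sublist (PySem.List.pyRange 0 ((q.length : Int)) 1) → (c.length : Int) = eZ →
      ∀ i ∈ c, eZ ≤ ((PySem.List.pyGetD q i []).length : Int)) :
    ∀ (cs : List (List Int)) (s : PySem.Dict (List Int) Int),
      (∀ c ∈ cs, c.Sublist (PySem.List.pyRange 0 ((q.length : Int)) 1) ∧ (c.length : Int) = eZ) →
      InvA q s (eZ.toNat - 1) →
      InvA q (cs.foldl (fun s t =>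
          let r := (PySem.List.pyRange 0 eZ 1).foldl (fun (sv : Int × Int) i =>
              let subt := PySem.List.slice t none (some i) ++ PySem.List.slice t (some (i + 1)) none
              (0 - sv.1,
               sv.2 + s.getD subt 0 * PySem.List.pyGetD (PySem.List.pyGetD q (PySem.List.pyGetD t i 0) []) (0 - eZ) 0 * sv.1))
            (1, 0)
          s.insert t r.2) s) (eZ.toNat - 1) ∧
        (∀ t : List Int, t.Sublist (PySem.List.pyRange 0 ((q.length : Int)) 1) → (t.length : Int) = eZ →
          (t ∈ cs ∨ s.getD t 0 = pvDets t.length (pvSel q t.length t)) →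
          (cs.foldl (fun s t =>
          let r := (PySem.List.pyRange 0 eZ 1).foldl (fun (sv : Int × Int) i =>
              let subt := PySem.List.slice t none (some i) ++ PySem.List.slice t (some (i + 1)) none
              (0 - sv.1,
               sv.2 + s.getD subt 0 * PySem.List.pyGetD (PySem.List.pyGetD q (PySem.List.pyGetD t i 0) []) (0 - eZ) 0 * sv.1))
            (1, 0)
          s.insert t r.2) s).getD t 0 = pvDets t.length (pvSel q t.length t)) := by
  intro cs
  induction cs with
  | nil =>
      intro s hcs hinv
      refine ⟨hinv, fun t _ _ h => ?_⟩
      rcases h with h | h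
      · simp at h
      · simpa using h
  | cons c cs ihc =>
      intro s hcs hinv
      obtain ⟨hcsub, hclen⟩ := hcs c (by simp)
      have hcN : c.length = eZ.toNat := by omega
      have hvalc : (s.insert c ((PySem.List.pyRange 0 eZ 1).foldl (fun (sv : Int × Int) i =>
              let subt := PySem.List.slice c none (some i) ++ PySem.List.slice c (some (i + 1)) none
              (0 - sv.1,
               sv.2 + s.getD subt 0 * PySem.List.pyGetD (PySem.List.pyGetD q (PySem.List.pyGetD c i 0) []) (0 - eZ) 0 * sv.1))
            (1, 0)).2).getD c 0 = pvDets c.length (pvSel q c.length c) :=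
        pvComboStep q s eZ c he hcsub hclen
          (by intro i hi; have := hrow c hcsub hclen i hi; omega)
          (by rw [hcN] at *; exact hinv)
      have hinv' : InvA q (s.insert c ((PySem.List.pyRange 0 eZ 1).foldl (fun (sv : Int × Int) i =>
              let subt := PySem.List.slice c none (some i) ++ PySem.List.slice c (some (i + 1)) none
              (0 - sv.1,
               sv.2 + s.getD subt 0 * PySem.List.pyGetD (PySem.List.pyGetD q (PySem.List.pyGetD c i 0) []) (0 - eZ) 0 * sv.1))
            (1, 0)).2) (eZ.toNat - 1) := by
        intro t hts htl
        rw [PySem.Dict.getD_insert, if_neg (by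
          intro hteq
          subst hteq
          omega)]
        exact hinv t hts htl
      rw [List.foldl_cons]
      obtain ⟨h1, h2⟩ := ihc _ (fun c' hc' => hcs c' (by simp [hc'])) hinv'
      refine ⟨h1, ?_⟩
      intro t hts htl hdisj
      apply h2 t hts htl
      rcases hdisj with hmem | hval
      · rcases List.mem_cons.mp hmem with hteq | hmem'
        · subst hteq
          right
          exact hvalc
        · left; exact hmem'
      · by_cases hteq : t = c
        · subst hteq
          right
          exact hvalc
        · right
          rw [PySem.Dict.getD_insert, if_neg hteq]
          exact hval

theorem pvOuterAux (q : List (List Int)) (dN : Nat)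
    (hrows : ∀ r ∈ q, min dN q.length ≤ r.length) :
    ∀ (k : Nat) (a : Int) (s : PySem.Dict (List Int) Int), 1 ≤ a → a + (k : Int) = (dN : Int) + 1 →
      InvA q s (a.toNat - 1) →
      InvA q ((PySem.List.pyRange a ((dN : Int) + 1) 1).foldl (fun s e =>
        (PySem.List.combinations (PySem.List.pyRange 0 ((q.length : Int)) 1) e.toNat).foldl (fun s t =>
          let r := (PySem.List.pyRange 0 e 1).foldl (fun (sv : Int × Int) i =>
              let subt := PySem.List.slice t none (some i) ++ PySem.List.slice t (some (i + 1)) none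
              (0 - sv.1,
               sv.2 + s.getD subt 0 * PySem.List.pyGetD (PySem.List.pyGetD q (PySem.List.pyGetD t i 0) []) (0 - e) 0 * sv.1))
            (1, 0)
          s.insert t r.2) s) s) dN := by
  intro k
  induction k with
  | zero =>
      intro a s ha hsum hinv
      push_cast at hsum
      rw [PySem.List.pyRange_one_eq_nil (a := a) (b := (dN : Int) + 1) (by omega), List.foldl_nil]
      have hd : a.toNat - 1 = dN := by omega
      exact hd ▸ hinv
  | succ k ihk =>
      intro a s ha hsum hinv
      push_cast at hsum
      rw [PySem.List.pyRange_one_cons (a := a) (b := (dN : Int) + 1) (by omega), List.foldl_cons]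
      apply ihk (a + 1) _ (by omega) (by omega)
      -- one round: all size-a combinations get inserted correctly
      have hrow : ∀ (c : List Int), c.Sublist (PySem.List.pyRange 0 ((q.length : Int)) 1) → (c.length : Int) = a →
          ∀ i ∈ c, a ≤ ((PySem.List.pyGetD q i []).length : Int) := by
        intro c hcs hcl i hi
        have hmem : i ∈ PySem.List.pyRange 0 ((q.length : Int)) 1 := hcs.mem hi
        rw [PySem.List.mem_pyRange_one] at hmem
        have hlenle : c.length ≤ (PySem.List.pyRange 0 ((q.length : Int)) 1).length := hcs.length_le
        rw [PySem.List.length_pyRange_one] at hlenle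
        have hrq := hrows _ (pvMemRange q i hmem.1 hmem.2)
        omega
      obtain ⟨h1, h2⟩ := pvCombosFold q a ha hrow
        (PySem.List.combinations (PySem.List.pyRange 0 ((q.length : Int)) 1) a.toNat) s
        (by
          intro c hc
          rw [PySem.List.mem_combinations_iff] at hc
          exact ⟨hc.1, by omega⟩)
        hinv
      intro t hts htl
      rcases Nat.lt_or_ge t.length a.toNat with hlt | hge
      · exact h1 t hts (by omega)
      · have htlen : (t.length : Int) = a := by omega
        apply h2 t hts htlen
        left
        rw [PySem.List.mem_combinations_iff]
        exact ⟨hts, by omega⟩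

theorem pvSubdets_ok (q : List (List Int)) (hq : q ≠ [])
    (hrows : ∀ r ∈ q, min (q.headD []).length q.length ≤ r.length) :
    InvA q (subdets q) (q.headD []).length := by
  have hbase : InvA q (PySem.Dict.ofList [([], 1)]) 0 := by
    intro t hts htl
    have : t = [] := List.eq_nil_of_length_eq_zero (by omega)
    subst this
    rfl
  have := pvOuterAux q (q.headD []).length hrows ((q.headD []).length) 1
    (PySem.Dict.ofList [([], 1)]) (by omega) (by ring) (by simpa using hbase)
  unfold subdets
  rw [pvHeadGet q hq]
  exact this

-- ===== final assembly helpers =====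
theorem pvModTwo (x : Int) : PySem.Int.mod x 2 = 0 ∨ PySem.Int.mod x 2 = 1 := by
  have h1 := PySem.Int.mod_nonneg x (b := 2) (by omega)
  have h2 := PySem.Int.mod_lt x (b := 2) (by omega)
  omega

theorem pvAltLoop (rows : List (List Int)) (j : Int) :
    ∀ (l : List Int), (∀ i ∈ l, 0 ≤ i ∧ i < (rows.length : Int)) →
    ∀ (acc : List Int) (c : PySem.Dict (List (List Int)) Int), CacheOKB c →
    (l.foldl (fun (st : List Int × PySem.Dict (List (List Int)) Int) i =>
        let minor := PySem.List.slice rows none (some i) ++ PySem.List.slice rows (some (i + 1)) none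
        let sign : Int := if PySem.Int.mod (i + j) 2 ≠ 0 then -1 else 1
        let p := bdet minor.length minor st.2
        (st.1 ++ [sign * p.1], p.2)) (acc, c)).1 =
      acc ++ l.map (fun i => (if PySem.Int.mod (i + j) 2 ≠ 0 then (-1 : Int) else 1) *
        pvDets (rows.eraseIdx i.toNat).length (rows.eraseIdx i.toNat)) := by
  intro l
  induction l with
  | nil => intro _ acc c _; simp
  | cons i l ihl =>
      intro hl acc c hc
      obtain ⟨hi0, hilt⟩ := hl i (by simp)
      have hminor : PySem.List.slice rows none (some i) ++ PySem.List.slice rows (some (i + 1)) none =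
          rows.eraseIdx i.toNat := pvCut rows i hi0
      obtain ⟨hv, hcok⟩ := pvBdet_ok (rows.eraseIdx i.toNat).length (rows.eraseIdx i.toNat) c le_rfl hc
      rw [List.foldl_cons]
      dsimp only
      rw [hminor, hv]
      rw [ihl (fun x hx => hl x (by simp [hx])) _ _ hcok]
      simp

-- ===== VERDICT (by name: the statement is the Claim_ definition above) =====
theorem pvCacheEmpty : CacheOKB PySem.Dict.empty := by
  intro m v h
  simp [PySem.Dict.empty, PySem.Dict.get?] at h

theorem adjugate_row_spec : Claim_equal_adjugate_row := by
  unfold Claim_equal_adjugate_row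
  intro pts j _ hpre
  obtain ⟨hne, hrows0, hd0⟩ := hpre
  unfold Spec_adjugate_row adjugate_row adjugate_row_alt
  dsimp only
  have hnq : (List.map (fun p => PySem.List.slice p none (some j) ++ PySem.List.slice p (some (j + 1))) pts).length = pts.length :=
    List.length_map ..
  have hqne : (List.map (fun p => PySem.List.slice p none (some j) ++ PySem.List.slice p (some (j + 1))) pts) ≠ [] := by
    cases pts <;> simp_all
  have hhead : (List.map (fun p => PySem.List.slice p none (some j) ++ PySem.List.slice p (some (j + 1))) pts).headD [] =
      PySem.List.slice (pts.headD []) none (some j) ++ PySem.List.slice (pts.headD []) (some (j + 1)) none := by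
    cases pts with
    | nil => simp_all
    | cons a l => rfl
  have hrows' : ∀ r ∈ (List.map (fun p => PySem.List.slice p none (some j) ++ PySem.List.slice p (some (j + 1))) pts),
      min ((List.map (fun p => PySem.List.slice p none (some j) ++ PySem.List.slice p (some (j + 1))) pts).headD []).length
        (List.map (fun p => PySem.List.slice p none (some j) ++ PySem.List.slice p (some (j + 1))) pts).length ≤ r.length := by
    intro r hr
    rw [hhead, hnq]
    exact hrows0 r hr
  have hd' : pts.length - 1 ≤ ((List.map (fun p => PySem.List.slice p none (some j) ++ PySem.List.slice p (some (j + 1))) pts).headD []).length := by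
    rw [hhead]; exact hd0
  have hInv := pvSubdets_ok _ hqne hrows'
  rw [PySem.List.foldl_append_singleton_eq_map
    (f := fun i => (subdets (List.map (fun p => PySem.List.slice p none (some j) ++ PySem.List.slice p (some (j + 1))) pts)).getD
        (PySem.List.slice (PySem.List.pyRange 0 ((pts.length : Int)) 1) none (some i) ++
          PySem.List.slice (PySem.List.pyRange 0 ((pts.length : Int)) 1) (some (i + 1)) none) 0 *
      (1 - PySem.Int.mod (i + j) 2 * 2))]
  rw [pvAltLoop _ j (PySem.List.pyRange 0 ((pts.length : Int)) 1)
    (by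
      intro i hi
      rw [PySem.List.mem_pyRange_one] at hi
      refine ⟨hi.1, ?_⟩
      rw [List.length_map]
      exact hi.2)
    [] PySem.Dict.empty pvCacheEmpty]
  simp only [List.nil_append]
  apply List.map_eq_map_iff.mpr
  intro i hi
  rw [PySem.List.mem_pyRange_one] at hi
  have hit : i.toNat < pts.length := by omega
  have hminq : pts.length - 1 ≤ min ((List.map (fun p => PySem.List.slice p none (some j) ++ PySem.List.slice p (some (j + 1))) pts).headD []).length
      (List.map (fun p => PySem.List.slice p none (some j) ++ PySem.List.slice p (some (j + 1))) pts).length := by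
    rw [hnq]
    omega
  have hROWS : (List.map (fun p =>
        PySem.List.slice (PySem.List.slice p none (some j) ++ PySem.List.slice p (some (j + 1)))
          (some ((((PySem.List.slice p none (some j) ++ PySem.List.slice p (some (j + 1))).length : Int)) - ((pts.length : Int) - 1)))) pts) =
      (List.map (fun p => PySem.List.slice p none (some j) ++ PySem.List.slice p (some (j + 1))) pts).map (pvTrim (pts.length - 1)) := by
    rw [List.map_map]
    apply List.map_eq_map_iff.mpr
    intro p hp
    simp only [Function.comp]
    have hlenp : pts.length - 1 ≤ (PySem.List.slice p none (some j) ++ PySem.List.slice p (some (j + 1)) none).length := by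
      have := hrows' _ (List.mem_map_of_mem hp)
      omega
    rw [PySem.List.slice_from _ (by omega)]
    unfold pvTrim
    congr 1
    omega
  rw [pvCut _ i hi.1]
  simp only [InvA] at hInv
  rw [hnq] at hInv
  have hTlen : (PySem.List.pyRange 0 ((pts.length : Int)) 1).length = pts.length := by
    rw [PySem.List.length_pyRange_one]
    omega
  have hElen : ((PySem.List.pyRange 0 ((pts.length : Int)) 1).eraseIdx i.toNat).length = pts.length - 1 := by
    rw [List.length_eraseIdx_of_lt (by omega), hTlen]
  rw [hInv _ (List.eraseIdx_sublist _ _) (by omega)]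
  have hSel : pvSel (List.map (fun p => PySem.List.slice p none (some j) ++ PySem.List.slice p (some (j + 1))) pts)
      (pts.length - 1) ((PySem.List.pyRange 0 ((pts.length : Int)) 1).eraseIdx i.toNat) =
      ((List.map (fun p => PySem.List.slice p none (some j) ++ PySem.List.slice p (some (j + 1))) pts).map
        (pvTrim (pts.length - 1))).eraseIdx i.toNat := by
    unfold pvSel
    rw [← List.eraseIdx_map]
    congr 1
    rw [show (fun i => pvTrim (pts.length - 1) (PySem.List.pyGetD (List.map (fun p => PySem.List.slice p none (some j) ++ PySem.List.slice p (some (j + 1))) pts) i [])) =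
        ((pvTrim (pts.length - 1)) ∘ (fun i => PySem.List.pyGetD (List.map (fun p => PySem.List.slice p none (some j) ++ PySem.List.slice p (some (j + 1))) pts) i [])) from rfl]
    rw [← List.map_map]
    rw [show ((pts.length : Int)) = (((List.map (fun p => PySem.List.slice p none (some j) ++ PySem.List.slice p (some (j + 1))) pts).length : Int)) by rw [hnq]]
    rw [PySem.List.map_pyGetD_pyRange_zero']
  rw [hElen, hSel, hROWS]
  have hRlen : (((List.map (fun p => PySem.List.slice p none (some j) ++ PySem.List.slice p (some (j + 1))) pts).map
      (pvTrim (pts.length - 1))).eraseIdx i.toNat).length = pts.length - 1 := by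
    rw [List.length_eraseIdx_of_lt (by rw [List.length_map, hnq]; omega), List.length_map, hnq]
  rw [hRlen]
  rcases pvModTwo (i + j) with hm | hm <;> rw [hm] <;> norm_num
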